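-- pv_equiv track=rewrite | github.com/omaromran/parolegy | pipeline/normalizer.py | apply_facility_lookup
-- ===== SOURCE A (Python) =====
-- from typing import Any
--
-- def apply_facility_lookup(
--     source_state: str,
--     facility: str,
--     addresses: dict[str, Any],
-- ) -> tuple[str, str, str, str]:
--     st = source_state.upper()
--     fac = (facility or "").strip().upper()
--     by_state = addresses.get(st, {})
--     if not fac:
--         return "", "", "", ""
--     # Exact key match first
--     for key, addr in by_state.items():
--         if key.upper() == fac:
--             return (
--                 addr.get("address", ""),
--                 addr.get("city", ""),
--                 addr.get("state", st),
--                 addr.get("zip", ""),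
--             )
--     # Substring match on facility name
--     for key, addr in by_state.items():
--         if key.startswith("_"):
--             continue
--         if key.upper() in fac or fac in key.upper():
--             return (
--                 addr.get("address", ""),
--                 addr.get("city", ""),
--                 addr.get("state", st),
--                 addr.get("zip", ""),
--             )
--     default = by_state.get("_DEFAULT")
--     if isinstance(default, dict) and default.get("address"):
--         return (
--             default.get("address", ""),
--             default.get("city", ""),
--             default.get("state", st),
--             default.get("zip", ""),
--         )
--     return "", "", "", ""
-- ===== SOURCE B (Python) =====
-- def apply_facility_lookup(source_state, facility, addresses):
--     st = source_state.upper()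
--     fac = (facility or "").strip().upper()
--     if not fac:
--         return "", "", "", ""
--     by_state = addresses.get(st, {})
--
--     def fields(a):
--         return a.get("address", ""), a.get("city", ""), a.get("state", st), a.get("zip", "")
--
--     candidate = None
--     # one pass: an exact key match returns immediately; the first substring
--     # match (non-'_' key) is recorded as a fallback but scanning continues
--     for key, addr in by_state.items():
--         ku = key.upper()
--         if ku == fac:
--             return fields(addr)
--         if candidate is None and not key.startswith("_") and (ku in fac or fac in ku):
--             candidate = addr
--     if candidate is not None:
--         return fields(candidate)
--     default = by_state.get("_DEFAULT")
--     if isinstance(default, dict) and default.get("address"):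
--         return fields(default)
--     return "", "", "", ""
-- ===== Notes on version B (the rewrite author's own statement) =====
-- stated objective: alternative
-- what changed: Merged A's two sequential scans of by_state into a single pass that returns on an exact key match and carries the first substring-match candidate as a fallback applied after the loop.
import Mathlib
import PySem

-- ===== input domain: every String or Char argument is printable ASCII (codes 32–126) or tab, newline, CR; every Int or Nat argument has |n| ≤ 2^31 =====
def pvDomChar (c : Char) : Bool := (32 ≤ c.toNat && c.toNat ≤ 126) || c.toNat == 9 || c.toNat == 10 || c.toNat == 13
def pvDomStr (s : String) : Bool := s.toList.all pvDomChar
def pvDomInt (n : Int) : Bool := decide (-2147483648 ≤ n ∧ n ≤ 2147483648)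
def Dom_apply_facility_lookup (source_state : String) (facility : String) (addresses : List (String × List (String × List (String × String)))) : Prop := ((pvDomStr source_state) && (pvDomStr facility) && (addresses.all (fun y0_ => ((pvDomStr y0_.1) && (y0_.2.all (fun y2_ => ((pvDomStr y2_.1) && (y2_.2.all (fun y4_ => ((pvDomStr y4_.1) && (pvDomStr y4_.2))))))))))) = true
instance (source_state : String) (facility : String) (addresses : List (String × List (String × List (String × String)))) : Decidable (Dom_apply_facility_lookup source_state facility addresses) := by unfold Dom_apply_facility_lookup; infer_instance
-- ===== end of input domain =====

-- B merges A's two scans of by_state into ONE pass carrying a fallback candidate (alternative decomposition, same cost).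

-- ===== PORT A =====
-- dict.get on an association list: first match
def pvGet {α : Type} (d : List (String × α)) (k : String) : Option α :=
  match d with
  | [] => none
  | (k', v) :: rest => if k' = k then some v else pvGet rest k

def pvGetD (d : List (String × String)) (k dflt : String) : String :=
  (pvGet d k).getD dflt

-- the 4-tuple (addr.get("address",""), addr.get("city",""), addr.get("state",st), addr.get("zip",""))
def pvFields (st : String) (a : List (String × String)) : String × String × String × String :=
  (pvGetD a "address" "", pvGetD a "city" "", pvGetD a "state" st, pvGetD a "zip" "")

-- A's first loop: exact key match
def pvLoopExact (st fac : String) : List (String × List (String × String)) → Option (String × String × String × String)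
  | [] => none
  | (k, a) :: rest =>
    if PySem.Str.upper k = fac then some (pvFields st a) else pvLoopExact st fac rest

-- A's second loop: substring match, skipping '_'-prefixed keys
def pvLoopSub (st fac : String) : List (String × List (String × String)) → Option (String × String × String × String)
  | [] => none
  | (k, a) :: rest =>
    if PySem.Str.startswith k "_" then pvLoopSub st fac rest
    else if PySem.Str.isIn (PySem.Str.upper k) fac || PySem.Str.isIn fac (PySem.Str.upper k) then some (pvFields st a)
    else pvLoopSub st fac rest

-- A's trailing _DEFAULT logic (default.get("address") truthy = nonempty string)
def pvDefault (st : String) (by_state : List (String × List (String × String))) : String × String × String × String :=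
  match pvGet by_state "_DEFAULT" with
  | some d => if pvGetD d "address" "" ≠ "" then pvFields st d else ("", "", "", "")
  | none => ("", "", "", "")

def apply_facility_lookup (source_state : String) (facility : String) (addresses : List (String × List (String × List (String × String)))) : String × String × String × String :=
  let st := PySem.Str.upper source_state
  let fac := PySem.Str.upper (PySem.Str.strip facility)
  let by_state := (pvGet addresses st).getD []
  if fac = "" then ("", "", "", "")
  else
    match pvLoopExact st fac by_state with
    | some t => t
    | none =>
      match pvLoopSub st fac by_state with
      | some t => t
      | none => pvDefault st by_state

-- ===== PORT B =====
-- B's single pass: return on exact match, record the first substring candidate, keep scanning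
def pvScanB (st fac : String) : List (String × List (String × String)) → Option (List (String × String)) → Option (String × String × String × String)
  | [], cand => cand.map (pvFields st)
  | (k, a) :: rest, cand =>
    let ku := PySem.Str.upper k
    if ku = fac then some (pvFields st a)
    else pvScanB st fac rest
      (if cand.isNone && !PySem.Str.startswith k "_" && (PySem.Str.isIn ku fac || PySem.Str.isIn fac ku)
       then some a else cand)

def apply_facility_lookup_alt (source_state : String) (facility : String) (addresses : List (String × List (String × List (String × String)))) : String × String × String × String :=
  let st := PySem.Str.upper source_state
  let fac := PySem.Str.upper (PySem.Str.strip facility)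
  if fac = "" then ("", "", "", "")
  else
    let by_state := (pvGet addresses st).getD []
    match pvScanB st fac by_state none with
    | some t => t
    | none => pvDefault st by_state

-- ===== PRECONDITION & SPEC =====
def Spec_apply_facility_lookup (source_state : String) (facility : String) (addresses : List (String × List (String × List (String × String)))) (out : String × String × String × String) : Prop := out = apply_facility_lookup_alt source_state facility addresses
instance (source_state : String) (facility : String) (addresses : List (String × List (String × List (String × String)))) (out : String × String × String × String) : Decidable (Spec_apply_facility_lookup source_state facility addresses out) := by unfold Spec_apply_facility_lookup; infer_instance

-- ===== CLAIM (what is proved, stated in full; the proofs are below) =====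
def Claim_equal_apply_facility_lookup : Prop := ∀ (source_state : String) (facility : String) (addresses : List (String × List (String × List (String × String)))), Dom_apply_facility_lookup source_state facility addresses → Spec_apply_facility_lookup source_state facility addresses (apply_facility_lookup source_state facility addresses)

-- ===== LEMMAS AND PROOFS =====

-- B's single pass = A's exact-match scan, falling back to the carried candidate, then to A's substring scan
theorem pvScanB_eq (st fac : String) (l : List (String × List (String × String))) (cand : Option (List (String × String))) :
    pvScanB st fac l cand =
      match pvLoopExact st fac l with
      | some t => some t
      | none =>
        match cand with
        | some a => some (pvFields st a)
        | none => pvLoopSub st fac l := by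
  induction l generalizing cand with
  | nil => cases cand <;> simp [pvScanB, pvLoopExact, pvLoopSub]
  | cons p rest ih =>
    obtain ⟨k, a⟩ := p
    by_cases h : PySem.Str.upper k = fac
    · simp [pvScanB, pvLoopExact, h]
    · cases cand with
      | some a0 =>
        simp [pvScanB, pvLoopExact, h, ih]
      | none =>
        by_cases hsw : PySem.Chars.startswith k.toList ['_'] = true
        · simp [pvScanB, pvLoopExact, pvLoopSub, h, hsw, ih]
        · by_cases hsub : (PySem.Chars.isIn (PySem.Chars.upper k.toList) fac.toList = true ∨ PySem.Chars.isIn fac.toList (PySem.Chars.upper k.toList) = true)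
          · simp [pvScanB, pvLoopExact, pvLoopSub, h, hsw, hsub, ih]
          · simp [pvScanB, pvLoopExact, pvLoopSub, h, hsw, hsub, ih]

-- ===== VERDICT (by name: the statement is the Claim_ definition above) =====
theorem apply_facility_lookup_spec : Claim_equal_apply_facility_lookup := by
  intro source_state facility addresses _
  unfold Spec_apply_facility_lookup apply_facility_lookup apply_facility_lookup_alt
  by_cases hfac : PySem.Str.upper (PySem.Str.strip facility) = ""
  · simp [hfac]
  · simp only [hfac, if_false]
    rw [pvScanB_eq]
    cases pvLoopExact (PySem.Str.upper source_state) (PySem.Str.upper (PySem.Str.strip facility)) ((pvGet addresses (PySem.Str.upper source_state)).getD []) <;>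
      cases h2 : pvLoopSub (PySem.Str.upper source_state) (PySem.Str.upper (PySem.Str.strip facility)) ((pvGet addresses (PySem.Str.upper source_state)).getD []) <;>
      simp
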